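-- pv_equiv track=rewrite | github.com/robertohernando/Codewars | python/5kyu/weights/weight.py | order_weight
-- ===== SOURCE A (Python) =====
-- def order_weight(string):
--     # 0.- Si la lista es vacía, devuelvo cadena vacía
--     if string == '':
--         return string
--     # 1.- Separo los números de la cadena, creando una lista ordenada
--     numeros = string.split()
--
--     # 2. Ordeno la lista alfabéticamente
--     numeros.sort()
--
--     # 2.- Calculo los pesos de cada número
--     pesos = []
--     for numero in numeros:
--         peso = 0
--         for i in numero:
--             peso += int(i)
--         pesos.append(peso)
--
--     # ~~3.- Construyo un diccionario con cada número y peso~~ => ERROR -> así pierdo las entradas repetidas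
--     # 3.- Construyo una lista con pares de elementos: (número, peso) y ordeno por peso
--     numeros_y_pesos = list(zip(*sorted(zip(numeros, pesos), key=lambda x: x[1])))
--
--     # 4.- Devuelvo los números como una cadena de caracteres
--     return(' '.join(numeros_y_pesos[0]))
-- ===== SOURCE B (Python) =====
-- def order_weight(string):
--     # Bucket tokens by digit-sum weight, then emit buckets in weight order,
--     # each bucket sorted lexicographically.
--     buckets = {}
--     for token in string.split():
--         w = 0
--         for ch in token:
--             w += int(ch)
--         buckets.setdefault(w, []).append(token)
--     out = []
--     for w in sorted(buckets):
--         out.extend(sorted(buckets[w]))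
--     return ' '.join(out)
-- ===== Notes on version B (the rewrite author's own statement) =====
-- stated objective: alternative
-- what changed: Instead of A's alphabetical pre-sort followed by a stable re-sort of (token, weight) pairs by weight and a zip-transpose, B builds a dict bucketing tokens by digit-sum weight in one pass and then emits the buckets in ascending weight order, each bucket sorted lexicographically.
import Mathlib
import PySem

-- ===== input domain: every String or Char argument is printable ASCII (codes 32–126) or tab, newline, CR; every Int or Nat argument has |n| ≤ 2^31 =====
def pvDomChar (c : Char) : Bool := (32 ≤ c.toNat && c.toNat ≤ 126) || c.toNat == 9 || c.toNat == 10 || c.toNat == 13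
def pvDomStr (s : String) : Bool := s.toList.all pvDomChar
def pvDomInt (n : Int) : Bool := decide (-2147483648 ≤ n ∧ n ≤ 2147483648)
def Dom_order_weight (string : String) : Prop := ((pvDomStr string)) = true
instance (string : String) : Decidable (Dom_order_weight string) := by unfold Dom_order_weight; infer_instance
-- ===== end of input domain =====

-- B re-implements A by bucketing tokens in a dict keyed by digit-sum weight and emitting the
-- buckets in ascending weight order (each bucket sorted lexicographically), instead of A's
-- sort-then-stable-resort; same cost, different decomposition.

-- int(i) for one character i; Python raises ValueError where this is none (those inputs are excluded by Pre_)
def pvCharInt (c : Char) : Int := (PySem.Int.ofStr? (String.mk [c])).getD 0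

-- the digit-sum loop both Pythons contain verbatim ('peso = 0; for i in numero: peso += int(i)')
def pvWeight (s : String) : Int := s.toList.foldl (fun peso i => peso + pvCharInt i) 0

-- ===== PORT A =====
def order_weight (string : String) : String :=
  if string == "" then string
  else
    let numeros := PySem.List.sorted (PySem.Str.split₀ string) (fun x => x)
    let pesos := numeros.foldl (fun acc numero => acc ++ [pvWeight numero]) ([] : List Int)
    let pares := PySem.List.sorted (numeros.zip pesos) (fun x => x.2)
    -- numeros_y_pesos[0] raises IndexError when pares = [] (nonempty all-whitespace string);
    -- those inputs are excluded by Pre_; here the map/join of the empty list is harmless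
    PySem.Str.join " " (pares.map (fun x => x.1))

-- ===== PORT B =====
def order_weight_alt (string : String) : String :=
  let buckets := (PySem.Str.split₀ string).foldl
    (fun (d : PySem.Dict Int (List String)) token =>
      d.modify (pvWeight token) [] (fun l => l ++ [token]))   -- setdefault(w, []).append(token)
    PySem.Dict.empty
  let out := (PySem.List.sorted buckets.keys (fun x => x)).foldl
    (fun acc w => acc ++ PySem.List.sorted (buckets.getD w []) (fun x => x)) []
  PySem.Str.join " " out

-- ===== PRECONDITION & SPEC =====
-- Pre_ excludes exactly the inputs where A raises: nonempty all-whitespace strings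
-- (IndexError on numeros_y_pesos[0]) and tokens containing a non-digit character
-- (ValueError in int(i)); B raises on the latter too.
def Pre_order_weight (string : String) : Prop :=
  (string = "" ∨ PySem.Str.split₀ string ≠ []) ∧
  (PySem.Str.split₀ string).all (fun t => t.toList.all Char.isDigit) = true
instance (string : String) : Decidable (Pre_order_weight string) := by
  unfold Pre_order_weight; infer_instance

def pvWitness_order_weight : String := "56 65 74 100 99"

def Spec_order_weight (string : String) (out : String) : Prop := out = order_weight_alt string
instance (string : String) (out : String) : Decidable (Spec_order_weight string out) := by
  unfold Spec_order_weight; infer_instance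

-- ===== CLAIM (what is proved, stated in full; the proofs are below) =====
def Claim_equal_order_weight : Prop :=
  ∀ (string : String), Dom_order_weight string → Pre_order_weight string →
    Spec_order_weight string (order_weight string)

-- ===== LEMMAS AND PROOFS =====
def pvLexR {α : Type} (f : α → Int) (g : α → String) (a b : α) : Prop :=
  f a < f b ∨ (f a = f b ∧ g a ≤ g b)

lemma pv_insertBy_pairwise {α : Type} (f : α → Int) (g : α → String) (x : α) (ys : List α)
    (h : ys.Pairwise (pvLexR f g)) (hx : ∀ y ∈ ys, f y = f x → g y ≤ g x) :
    (PySem.List.insertBy (fun a b => decide (f a < f b)) x ys).Pairwise (pvLexR f g) := by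
  induction ys with
  | nil => simp [PySem.List.insertBy]
  | cons y ys ih =>
    rw [List.pairwise_cons] at h
    by_cases hxy : f x < f y
    · simp only [PySem.List.insertBy, hxy, decide_true, if_true]
      refine List.Pairwise.cons ?_ (List.Pairwise.cons h.1 h.2)
      intro z hz
      rcases List.mem_cons.mp hz with rfl | hz
      · exact Or.inl hxy
      · rcases h.1 z hz with h1 | ⟨h1, h2⟩
        · exact Or.inl (lt_trans hxy h1)
        · exact Or.inl (h1 ▸ hxy)
    · simp only [PySem.List.insertBy, hxy, decide_false, if_false, Bool.false_eq_true]
      refine List.Pairwise.cons ?_ (ih h.2 (fun z hz hf => hx z (List.mem_cons_of_mem _ hz) hf))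
      intro z hz
      rw [PySem.List.mem_insertBy] at hz
      rcases hz with rfl | hz
      · rcases lt_or_eq_of_le (not_lt.mp hxy) with h1 | h1
        · exact Or.inl h1
        · exact Or.inr ⟨h1, hx y (List.mem_cons_self) h1⟩
      · exact h.1 z hz

lemma pv_foldl_insertBy_pairwise {α : Type} (f : α → Int) (g : α → String)
    (l acc : List α) (hacc : acc.Pairwise (pvLexR f g))
    (hl : l.Pairwise (fun a b => g a ≤ g b))
    (hcross : ∀ y ∈ acc, ∀ x ∈ l, f y = f x → g y ≤ g x) :
    (l.foldl (fun acc x => PySem.List.insertBy (fun a b => decide (f a < f b)) x acc) acc).Pairwise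
      (pvLexR f g) := by
  induction l generalizing acc with
  | nil => exact hacc
  | cons x l ih =>
    rw [List.pairwise_cons] at hl
    simp only [List.foldl_cons]
    refine ih _ (pv_insertBy_pairwise f g x acc hacc
      (fun y hy hf => hcross y hy x List.mem_cons_self hf)) hl.2 ?_
    intro y hy z hz hf
    rcases (PySem.List.mem_insertBy _ _ _ _).mp hy with rfl | hy
    · exact hl.1 z hz
    · exact hcross y hy z (List.mem_cons_of_mem _ hz) hf

lemma pv_zip_map (l : List String) (h : String → Int) :
    l.zip (l.map h) = l.map (fun s => (s, h s)) := by
  induction l with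
  | nil => simp
  | cons a t ih => simp [ih]

lemma pv_perm_flatMap_filter (f : String → Int) (ks : List Int) (xs : List String)
    (hnd : ks.Nodup) (hcov : ∀ x ∈ xs, f x ∈ ks) :
    (ks.flatMap (fun w => xs.filter (fun t => f t == w))).Perm xs := by
  induction ks generalizing xs with
  | nil =>
    cases xs with
    | nil => simp
    | cons a t => exact absurd (hcov a List.mem_cons_self) (List.not_mem_nil)
  | cons k ks ih =>
    rw [List.nodup_cons] at hnd
    have hrw : ∀ w ∈ ks, xs.filter (fun t => f t == w)
        = (xs.filter (fun t => !(f t == k))).filter (fun t => f t == w) := by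
      intro w hw
      rw [List.filter_filter]
      apply List.filter_congr
      intro t _
      by_cases hfw : f t = w
      · subst hfw
        have h2 : f t ≠ k := fun hk => hnd.1 (hk ▸ hw)
        simp [h2]
      · simp [hfw]
    have hmap : ks.flatMap (fun w => xs.filter (fun t => f t == w))
        = ks.flatMap (fun w => (xs.filter (fun t => !(f t == k))).filter (fun t => f t == w)) := by
      simp only [List.flatMap]
      exact congrArg List.flatten (List.map_congr_left hrw)
    have hcov' : ∀ x ∈ xs.filter (fun t => !(f t == k)), f x ∈ ks := by
      intro x hx
      rw [List.mem_filter] at hx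
      rcases List.mem_cons.mp (hcov x hx.1) with h | h
      · simp [h] at hx
      · exact h
    rw [List.flatMap_cons, hmap]
    exact (List.Perm.append_left _ (ih _ hnd.2 hcov')).trans (List.filter_append_perm _ xs)

-- the composite order both results are sorted by: weight first, then the string itself
def pvKey (s : String) : Lex (Int × String) := toLex (pvWeight s, s)

lemma pvKey_injective : Function.Injective pvKey := by
  intro a b h
  have := congrArg (fun x => (ofLex x).2) h
  simpa [pvKey] using this

lemma pvKey_le_iff (a b : String) :
    pvKey a ≤ pvKey b ↔ (pvWeight a < pvWeight b ∨ (pvWeight a = pvWeight b ∧ a ≤ b)) := by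
  simp [pvKey, Prod.Lex.le_iff]

lemma pv_A_list (toks : List String) :
    ((PySem.List.sorted
          ((PySem.List.sorted toks (fun x => x)).zip
            ((PySem.List.sorted toks (fun x => x)).foldl
              (fun acc numero => acc ++ [pvWeight numero]) []))
          (fun x => x.2)).map (fun x => x.1)).Perm toks ∧
      ((PySem.List.sorted
          ((PySem.List.sorted toks (fun x => x)).zip
            ((PySem.List.sorted toks (fun x => x)).foldl
              (fun acc numero => acc ++ [pvWeight numero]) []))
          (fun x => x.2)).map (fun x => x.1)).Pairwise (fun a b => pvKey a ≤ pvKey b) := by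
  set ns := PySem.List.sorted toks (fun x => x) with hns
  have hfold : ns.foldl (fun acc numero => acc ++ [pvWeight numero]) [] = ns.map pvWeight := by
    simpa using PySem.List.foldl_append_singleton_eq_map (l := ns) (f := pvWeight) (acc := [])
  rw [hfold, pv_zip_map]
  set pairs := ns.map (fun s => (s, pvWeight s)) with hpairs
  have hmem : ∀ p ∈ PySem.List.sorted pairs (fun x => x.2), p.2 = pvWeight p.1 := by
    intro p hp
    rw [PySem.List.mem_sorted, hpairs, List.mem_map] at hp
    obtain ⟨s, _, rfl⟩ := hp
    rfl
  constructor
  · have h1 : ((PySem.List.sorted pairs (fun x => x.2)).map (fun x => x.1)).Perm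
        (pairs.map (fun x => x.1)) :=
      (PySem.List.sorted_perm pairs (fun x => x.2) false).map _
    have h2 : pairs.map (fun x => x.1) = ns := by simp [hpairs, Function.comp_def]
    exact (h2 ▸ h1).trans (PySem.List.sorted_perm toks (fun x => x) false)
  · have hg : pairs.Pairwise (fun a b => a.1 ≤ b.1) := by
      rw [hpairs, List.pairwise_map]
      exact PySem.List.sorted_pairwise toks (fun x => x)
    have hlex : (PySem.List.sorted pairs (fun x => x.2)).Pairwise
        (pvLexR (fun x => x.2) (fun x => x.1)) := by
      rw [PySem.List.sorted_eq_foldl_insertBy]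
      exact pv_foldl_insertBy_pairwise _ _ pairs [] (by simp) hg (by simp)
    rw [List.pairwise_map]
    refine hlex.imp_of_mem ?_
    intro a b ha hb hab
    rw [pvKey_le_iff, ← hmem a ha, ← hmem b hb]
    exact hab

lemma pv_buckets_getD (toks : List String) (w : Int) :
    ((toks.foldl (fun (d : PySem.Dict Int (List String)) token =>
        d.modify (pvWeight token) [] (fun l => l ++ [token])) PySem.Dict.empty).getD w [])
      = toks.filter (fun t => pvWeight t == w) := by
  have h : toks.foldl (fun (d : PySem.Dict Int (List String)) token =>
        d.modify (pvWeight token) [] (fun l => l ++ [token])) PySem.Dict.empty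
      = (toks.map (fun t => (pvWeight t, t))).foldl
        (fun d p => d.modify p.1 [] (fun l => l ++ [p.2])) PySem.Dict.empty := by
    rw [List.foldl_map]
  rw [h, PySem.Dict.getD_foldl_modify_append]
  simp [List.filter_map, Function.comp_def]

lemma pv_buckets_keys (toks : List String) :
    (toks.foldl (fun (d : PySem.Dict Int (List String)) token =>
        d.modify (pvWeight token) [] (fun l => l ++ [token])) PySem.Dict.empty).keys
      = PySem.Set.ofList (toks.map pvWeight) := by
  rw [PySem.Dict.keys_foldl_modify_key toks pvWeight [] (fun _ t l => l ++ [t]) PySem.Dict.empty]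
  simp [PySem.Set.update, PySem.Set.ofList, PySem.Dict.keys_empty]

lemma pv_B_list (toks : List String) :
    (((PySem.List.sorted (PySem.Set.ofList (toks.map pvWeight)) (fun x => x)).foldl
        (fun acc w => acc ++ PySem.List.sorted (toks.filter (fun t => pvWeight t == w)) (fun x => x))
        [])).Perm toks ∧
      (((PySem.List.sorted (PySem.Set.ofList (toks.map pvWeight)) (fun x => x)).foldl
        (fun acc w => acc ++ PySem.List.sorted (toks.filter (fun t => pvWeight t == w)) (fun x => x))
        [])).Pairwise (fun a b => pvKey a ≤ pvKey b) := by
  set ks := PySem.List.sorted (PySem.Set.ofList (toks.map pvWeight)) (fun x => x) with hks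
  have hflat : ks.foldl
      (fun acc w => acc ++ PySem.List.sorted (toks.filter (fun t => pvWeight t == w)) (fun x => x)) []
      = ks.flatMap (fun w => PySem.List.sorted (toks.filter (fun t => pvWeight t == w)) (fun x => x)) := by
    simpa using PySem.List.foldl_append_eq_flatMap
      (g := fun w => PySem.List.sorted (toks.filter (fun t => pvWeight t == w)) (fun x => x))
      (l := ks) (acc := [])
  rw [hflat]
  have hknd : ks.Nodup :=
    ((PySem.List.sorted_perm _ _ false).nodup_iff).mpr (PySem.Set.nodup_ofList _)
  have hkmem : ∀ x ∈ toks, pvWeight x ∈ ks := by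
    intro x hx
    rw [hks, PySem.List.mem_sorted, PySem.Set.mem_ofList]
    exact List.mem_map_of_mem hx
  have hchunkmem : ∀ w, ∀ x ∈ PySem.List.sorted (toks.filter (fun t => pvWeight t == w)) (fun x => x),
      pvWeight x = w := by
    intro w x hx
    rw [PySem.List.mem_sorted, List.mem_filter] at hx
    exact beq_iff_eq.mp hx.2
  constructor
  · refine (List.Perm.flatMap (List.Perm.refl ks) ?_).trans
      (pv_perm_flatMap_filter pvWeight ks toks hknd hkmem)
    intro w _
    exact PySem.List.sorted_perm _ _ false
  · rw [List.pairwise_flatMap]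
    constructor
    · intro w _
      have hs : (PySem.List.sorted (toks.filter (fun t => pvWeight t == w)) (fun x => x)).Pairwise
          (fun a b => a ≤ b) := PySem.List.sorted_pairwise _ _
      refine hs.imp_of_mem ?_
      intro a b ha hb hab
      rw [pvKey_le_iff]
      exact Or.inr ⟨(hchunkmem w a ha).trans (hchunkmem w b hb).symm, hab⟩
    · have hklt : ks.Pairwise (fun a b => a < b) := by
        rw [hks]; exact PySem.List.sorted_ofList_pairwise_lt _
      refine hklt.imp ?_
      intro w1 w2 hlt x hx y hy
      rw [pvKey_le_iff]
      exact Or.inl (by rw [hchunkmem w1 x hx, hchunkmem w2 y hy]; exact hlt)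

-- ===== VERDICT (by name: the statement is the Claim_ definition above) =====
theorem order_weight_spec : Claim_equal_order_weight := by
  intro string _ _
  unfold Spec_order_weight
  by_cases hs : string = ""
  · subst hs; decide
  · have hbeq : (string == "") = false := by simpa using hs
    simp only [order_weight, order_weight_alt, hbeq, Bool.false_eq_true, if_false,
      pv_buckets_keys, pv_buckets_getD]
    set toks := PySem.Str.split₀ string with htoks
    obtain ⟨hAperm, hApair⟩ := pv_A_list toks
    obtain ⟨hBperm, hBpair⟩ := pv_B_list toks
    exact congrArg (PySem.Str.join " ")
      (PySem.List.eq_of_perm_of_pairwise_le_of_injective pvKey pvKey_injective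
        (hAperm.trans hBperm.symm) hApair hBpair)
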